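-- pv_equiv track=rewrite | github.com/isakchoe/TIL | algorithm /dfs_bfs/ex_20.py | bfs
-- ===== SOURCE A (Python) =====
-- from _collections import deque
--
-- def bfs(arr):
--
--     length = len(arr)
--     q = deque()
--
--     check_list =[]
--
--     dx = [0,0,1,-1]
--     dy = [1,-1,0,0]
--
--     # 큐에 교사 위치 삽입
--     for i in range(length):
--         for e in range(length):
--             if arr[i][e] =="T":
--                 q.append([i,e])
--                 check_list.append([i,e])
--
--
--     while q:
--
--         row, col = q.popleft()
--
--         for i in range(4):
--
--             nx = row + dx[i]
--             ny = col + dy[i]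
--
--             while nx >=0 and ny>=0 and nx <length and ny<length:
--
--                 if arr[nx][ny] != "O":
--                     arr[nx][ny] = "T"
--
--                 if arr[nx][ny] == "O":
--                     break
--
--                 nx = nx + dx[i]
--                 ny = ny + dy[i]
--
--
--     answer = 0
--
--     # 안걸린 학생수 구하기
--     for i in range(length):
--         for e in range(length):
--             if arr[i][e] == "S":
--                 answer += 1
--
--
--     return answer
-- ===== SOURCE B (Python) =====
-- def _sweep(cells):
--     # sees[j] = there is a "T" before position j with no "O" strictly between it and j
--     res = []
--     st = False
--     for c in cells:
--         res.append(st)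
--         if c == "O":
--             st = False
--         elif c == "T":
--             st = True
--     return res
--
--
-- def _cov_line(cells):
--     back = list(reversed(_sweep(list(reversed(cells)))))
--     return [a or b for a, b in zip(_sweep(cells), back)]
--
--
-- def bfs(arr):
--     n = len(arr)
--     rows = [row[:n] for row in arr]
--     cols = [[rows[i][j] for i in range(n)] for j in range(n)]
--     covrow = [_cov_line(r) for r in rows]
--     covcol = [_cov_line(c) for c in cols]
--     return sum(1 for i in range(n) for j in range(n)
--                if rows[i][j] == "S" and not (covrow[i][j] or covcol[j][i]))
-- ===== Notes on version B (the rewrite author's own statement) =====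
-- stated objective: alternative
-- what changed: Replaces per-teacher ray walks over a grid mutated in place by four linear boolean sweeps per row/column that compute line-of-sight coverage from the original grid, then counts uncovered 'S' cells; B does not mutate arr.
import Mathlib
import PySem

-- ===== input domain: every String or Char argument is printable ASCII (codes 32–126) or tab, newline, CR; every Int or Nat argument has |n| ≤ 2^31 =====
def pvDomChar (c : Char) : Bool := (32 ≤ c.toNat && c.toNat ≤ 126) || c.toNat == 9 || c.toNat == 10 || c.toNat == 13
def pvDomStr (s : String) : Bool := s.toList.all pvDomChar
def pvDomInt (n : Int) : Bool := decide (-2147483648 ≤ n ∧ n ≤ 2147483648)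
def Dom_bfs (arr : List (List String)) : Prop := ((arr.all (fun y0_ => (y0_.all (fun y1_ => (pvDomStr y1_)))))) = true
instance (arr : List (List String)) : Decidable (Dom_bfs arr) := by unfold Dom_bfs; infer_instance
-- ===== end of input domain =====

-- B replaces A's per-teacher ray-marking (which mutates arr in place; B does not — the
-- equivalence proved here is about the return value) by four linear boolean sweeps per
-- row/column computing line-of-sight coverage, then counts uncovered "S" cells.

-- ===== PORT A =====
-- arr[i][j] read (all reads in A are at checked non-negative in-range indices; out of
-- range the Python raises, which Pre_bfs excludes, so a default "" is never the value read)
def pvCell (g : List (List String)) (i j : Nat) : String := (g.getD i []).getD j ""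
-- arr[i][j] = v  (in-place assignment, modelled functionally)
def pvSet (g : List (List String)) (i j : Nat) (v : String) : List (List String) :=
  g.set i ((g.getD i []).set j v)

-- the two initial scans building q (check_list is built identically and never read; dropped)
def pvTeachers (g : List (List String)) (n : Nat) : List (Nat × Nat) :=
  (List.range n).foldl (fun acc i =>
    (List.range n).foldl (fun acc e =>
      if pvCell g i e = "T" then acc ++ [(i, e)] else acc) acc) []

-- the inner `while` ray walk; fuel n+1 is enough for the walk to leave the n×n window,
-- so the recursion computes exactly what the (always terminating) Python while-loop does
def pvWalk (n : Nat) (dx dy : Int) (fuel : Nat) (g : List (List String)) (nx ny : Int) :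
    List (List String) :=
  match fuel with
  | 0 => g
  | f + 1 =>
    if 0 ≤ nx ∧ 0 ≤ ny ∧ nx < (n : Int) ∧ ny < (n : Int) then
      let g1 := if pvCell g nx.toNat ny.toNat ≠ "O" then pvSet g nx.toNat ny.toNat "T" else g
      if pvCell g1 nx.toNat ny.toNat = "O" then g1
      else pvWalk n dx dy f g1 (nx + dx) (ny + dy)
    else g

def bfs (arr : List (List String)) : Int :=
  let n := arr.length
  let q := pvTeachers arr n
  -- while q: pop a teacher, walk the 4 directions (dx,dy in the order of A's dx/dy tables)
  let g := q.foldl (fun g rc =>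
    [((0 : Int), (1 : Int)), (0, -1), (1, 0), (-1, 0)].foldl (fun g d =>
      pvWalk n d.1 d.2 (n + 1) g ((rc.1 : Int) + d.1) ((rc.2 : Int) + d.2)) g) arr
  -- final count of remaining "S"
  (List.range n).foldl (fun a i =>
    (List.range n).foldl (fun a e => if pvCell g i e = "S" then a + 1 else a) a) 0

-- ===== PORT B =====
-- _sweep: res[j] = "a 'T' occurs before j with no 'O' strictly between it and j"
def pvSweep (cells : List String) : List Bool :=
  (cells.foldl (fun (p : List Bool × Bool) c =>
      (p.1 ++ [p.2], if c = "O" then false else if c = "T" then true else p.2))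
    ([], false)).1

-- _cov_line: forward sweep OR reversed backward sweep
def pvCovLine (cells : List String) : List Bool :=
  List.zipWith (fun a b => a || b) (pvSweep cells) ((pvSweep cells.reverse).reverse)

def bfs_alt (arr : List (List String)) : Int :=
  let n := arr.length
  let rows := arr.map (fun row => row.take n)
  let cols := (List.range n).map (fun j => (List.range n).map (fun i => (rows.getD i []).getD j ""))
  let covrow := rows.map pvCovLine
  let covcol := cols.map pvCovLine
  (List.range n).foldl (fun a i =>
    (List.range n).foldl (fun a j =>
      if (rows.getD i []).getD j "" = "S" ∧
         ¬(((covrow.getD i []).getD j false) ∨ ((covcol.getD j []).getD i false)) then a + 1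
      else a) a) 0

-- ===== PRECONDITION & SPEC =====
-- Pre_: every row must have at least len(arr) entries; on a shorter row the Python A
-- raises IndexError in its initial scan (nothing else is excluded).
def Pre_bfs (arr : List (List String)) : Prop := ∀ row ∈ arr, arr.length ≤ row.length
instance (arr : List (List String)) : Decidable (Pre_bfs arr) := by unfold Pre_bfs; infer_instance

def pvWitness_bfs : List (List String) := [["T", "S"], ["S", "O"]]

def Spec_bfs (arr : List (List String)) (out : Int) : Prop := out = bfs_alt arr
instance (arr : List (List String)) (out : Int) : Decidable (Spec_bfs arr out) := by
  unfold Spec_bfs; infer_instance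

-- ===== CLAIM (what is proved, stated in full; the proofs are below) =====
def Claim_equal_bfs : Prop := ∀ (arr : List (List String)), Dom_bfs arr → Pre_bfs arr → Spec_bfs arr (bfs arr)

-- ===== LEMMAS AND PROOFS =====
theorem getD_set {α} (l : List α) (a i : Nat) (x d : α) :
    (l.set a x).getD i d = if a = i ∧ i < l.length then x else l.getD i d := by
  simp [List.getD, List.getElem?_set]
  split_ifs with h1 h2 h3 <;> simp_all
theorem pvSet_length (g : List (List String)) (a b : Nat) (v : String) :
    (pvSet g a b v).length = g.length := by
  simp [pvSet]

theorem pvSet_row_length (g : List (List String)) (a b : Nat) (v : String) (i : Nat) :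
    ((pvSet g a b v).getD i []).length = (g.getD i []).length := by
  simp only [pvSet, getD_set]
  split_ifs with h
  · obtain ⟨rfl, _⟩ := h; simp
  · rfl

theorem pvCell_set (g : List (List String)) (a b : Nat) (v : String) (i j : Nat) :
    pvCell (pvSet g a b v) i j =
      if a = i ∧ b = j ∧ a < g.length ∧ b < (g.getD a []).length then v
      else pvCell g i j := by
  simp only [pvCell, pvSet, getD_set]
  by_cases hi : a = i
  · subst hi
    by_cases hl : a < g.length
    · simp only [hl, and_true]
      simp only [if_true, true_and]
      rw [show ((g.getD a []).set b v).getD j "" = _ from getD_set _ _ _ _ _]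
      by_cases hj : b = j
      · subst hj; rfl
      · simp [hj]
    · simp [hl]
  · simp [hi]
-- ===== B-side: sweep characterization =====
def stStep (b : Bool) (c : String) : Bool := if c = "O" then false else if c = "T" then true else b

def sweepFrom (b : Bool) : List String → List Bool
  | [] => []
  | c :: l => b :: sweepFrom (stStep b c) l

theorem sweep_fold (l : List String) (acc : List Bool) (b : Bool) :
    l.foldl (fun (p : List Bool × Bool) c =>
        (p.1 ++ [p.2], if c = "O" then false else if c = "T" then true else p.2)) (acc, b) =
      (acc ++ sweepFrom b l, l.foldl stStep b) := by
  induction l generalizing acc b with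
  | nil => simp [sweepFrom]
  | cons c l ih =>
    rw [List.foldl_cons,
      show ((acc, b).1 ++ [(acc, b).2], if c = "O" then false else if c = "T" then true else (acc, b).2)
        = (acc ++ [b], stStep b c) from rfl, ih, List.foldl_cons]
    simp [sweepFrom]

theorem pvSweep_eq (l : List String) : pvSweep l = sweepFrom false l := by
  simp only [pvSweep]
  rw [sweep_fold]
  simp

theorem sweepFrom_length (b : Bool) (l : List String) : (sweepFrom b l).length = l.length := by
  induction l generalizing b with
  | nil => rfl
  | cons c l ih => simp [sweepFrom, ih]

theorem sweepFrom_getD (l : List String) (b : Bool) (j : Nat) (hj : j < l.length) :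
    (sweepFrom b l).getD j false = (l.take j).foldl stStep b := by
  induction l generalizing b j with
  | nil => simp at hj
  | cons c l ih =>
    cases j with
    | zero => simp [sweepFrom]
    | succ j => simpa [sweepFrom] using ih (stStep b c) j (by simpa using hj)

theorem getD_append_single (l : List String) (c : String) (k : Nat) :
    (l ++ [c]).getD k "" = if k < l.length then l.getD k "" else if k = l.length then c else "" := by
  rcases lt_trichotomy k l.length with h | h | h
  · rw [if_pos h, List.getD_append _ _ _ _ h]
  · subst h
    rw [if_neg (lt_irrefl _), if_pos rfl, List.getD_append_right _ _ _ _ le_rfl]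
    simp
  · have hlen : (l ++ [c]).length ≤ k := by simp; omega
    rw [List.getD_eq_default _ _ hlen, if_neg (by omega), if_neg (by omega)]

theorem stF_iff (l : List String) :
    l.foldl stStep false = true ↔
      ∃ k, k < l.length ∧ l.getD k "" = "T" ∧
        ∀ m, k < m → m < l.length → l.getD m "" ≠ "O" := by
  induction l using List.reverseRecOn with
  | nil => simp
  | append_singleton l c ih =>
    have hfold : (l ++ [c]).foldl stStep false = stStep (l.foldl stStep false) c := by
      rw [List.foldl_append]; rfl
    rw [hfold]
    have hlen : (l ++ [c]).length = l.length + 1 := by simp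
    by_cases hO : c = "O"
    · subst hO
      have hs : stStep (l.foldl stStep false) "O" = false := by simp [stStep]
      rw [hs]
      constructor
      · intro h; simp at h
      · rintro ⟨k, hk, hT, hchain⟩
        rw [hlen] at hk
        by_cases hkl : k < l.length
        · refine absurd ?_ (hchain l.length (by omega) (by omega))
          rw [getD_append_single, if_neg (lt_irrefl _), if_pos rfl]
        · have hke : k = l.length := by omega
          subst hke
          rw [getD_append_single, if_neg (lt_irrefl _), if_pos rfl] at hT
          exact absurd hT (by decide)
    · by_cases hT : c = "T"
      · subst hT
        have hs : stStep (l.foldl stStep false) "T" = true := by simp [stStep]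
        rw [hs]
        constructor
        · intro _
          refine ⟨l.length, by rw [hlen]; omega, ?_, ?_⟩
          · rw [getD_append_single, if_neg (lt_irrefl _), if_pos rfl]
          · intro m h1 h2; rw [hlen] at h2; omega
        · intro _; rfl
      · have hs : stStep (l.foldl stStep false) c = l.foldl stStep false := by
          simp [stStep, hO, hT]
        rw [hs, ih]
        constructor
        · rintro ⟨k, hk, hkT, hchain⟩
          refine ⟨k, by rw [hlen]; omega, ?_, ?_⟩
          · rw [getD_append_single, if_pos hk]; exact hkT
          · intro m h1 h2
            rw [getD_append_single]
            rw [hlen] at h2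
            by_cases hm : m < l.length
            · rw [if_pos hm]; exact hchain m h1 hm
            · have : m = l.length := by omega
              rw [if_neg hm, if_pos this]
              exact hO
        · rintro ⟨k, hk, hkT, hchain⟩
          rw [hlen] at hk
          have hkl : k < l.length := by
            by_contra hkl
            have hke : k = l.length := by omega
            subst hke
            rw [getD_append_single, if_neg (lt_irrefl _), if_pos rfl] at hkT
            exact hT hkT
          refine ⟨k, hkl, ?_, ?_⟩
          · rw [getD_append_single, if_pos hkl] at hkT; exact hkT
          · intro m h1 h2
            have := hchain m h1 (by rw [hlen]; omega)
            rw [getD_append_single, if_pos h2] at this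
            exact this
-- line-of-sight predicates over the original grid
def SeesL (g : List (List String)) (i j : Nat) : Prop :=
  ∃ k, k < j ∧ pvCell g i k = "T" ∧ ∀ m, k < m → m < j → pvCell g i m ≠ "O"
def SeesR (g : List (List String)) (n i j : Nat) : Prop :=
  ∃ k, j < k ∧ k < n ∧ pvCell g i k = "T" ∧ ∀ m, j < m → m < k → pvCell g i m ≠ "O"
def SeesU (g : List (List String)) (i j : Nat) : Prop :=
  ∃ k, k < i ∧ pvCell g k j = "T" ∧ ∀ m, k < m → m < i → pvCell g m j ≠ "O"
def SeesD (g : List (List String)) (n i j : Nat) : Prop :=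
  ∃ k, i < k ∧ k < n ∧ pvCell g k j = "T" ∧ ∀ m, i < m → m < k → pvCell g m j ≠ "O"

theorem getD_take {α} (l : List α) (n j : Nat) (d : α) (hj : j < n) :
    (l.take n).getD j d = l.getD j d := by
  simp [List.getD, hj]

theorem getD_reverse {α} (l : List α) (j : Nat) (d : α) (hj : j < l.length) :
    l.reverse.getD j d = l.getD (l.length - 1 - j) d := by
  rw [List.getD_eq_getElem _ _ (by simpa using hj),
      List.getD_eq_getElem _ _ (by omega)]
  rw [List.getElem_reverse]

theorem forward_iff (L : List String) (j : Nat) (hj : j ≤ L.length) :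
    ((L.take j).foldl stStep false = true) ↔
      ∃ k, k < j ∧ L.getD k "" = "T" ∧ ∀ m, k < m → m < j → L.getD m "" ≠ "O" := by
  rw [stF_iff]
  have hlen : (L.take j).length = j := by simp; omega
  constructor
  · rintro ⟨k, hk, hT, hch⟩
    rw [hlen] at hk
    refine ⟨k, hk, by rwa [getD_take _ _ _ _ hk] at hT, ?_⟩
    intro m h1 h2
    have := hch m h1 (by omega)
    rwa [getD_take _ _ _ _ h2] at this
  · rintro ⟨k, hk, hT, hch⟩
    refine ⟨k, by omega, by rwa [getD_take _ _ _ _ hk], ?_⟩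
    intro m h1 h2
    rw [hlen] at h2
    rw [getD_take _ _ _ _ h2]
    exact hch m h1 h2

theorem backward_iff (L : List String) (j : Nat) (hj : j < L.length) :
    ((L.reverse.take (L.length - 1 - j)).foldl stStep false = true) ↔
      ∃ k, j < k ∧ k < L.length ∧ L.getD k "" = "T" ∧
        ∀ m, j < m → m < k → L.getD m "" ≠ "O" := by
  rw [forward_iff _ _ (by simp; omega)]
  constructor
  · rintro ⟨k, hk, hT, hch⟩
    have hkl : k < L.length := by omega
    rw [getD_reverse _ _ _ hkl] at hT
    refine ⟨L.length - 1 - k, by omega, by omega, hT, ?_⟩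
    intro m h1 h2
    have hm : L.length - 1 - m < L.length := by omega
    have := hch (L.length - 1 - m) (by omega) (by omega)
    rw [getD_reverse _ _ _ (by omega : L.length - 1 - m < L.length)] at this
    have he : L.length - 1 - (L.length - 1 - m) = m := by omega
    rwa [he] at this
  · rintro ⟨k, hk1, hk2, hT, hch⟩
    refine ⟨L.length - 1 - k, by omega, ?_, ?_⟩
    · rw [getD_reverse _ _ _ (by omega)]
      have he : L.length - 1 - (L.length - 1 - k) = k := by omega
      rwa [he]
    · intro m h1 h2
      rw [getD_reverse _ _ _ (by omega)]
      exact hch (L.length - 1 - m) (by omega) (by omega)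

theorem covLine_getD (L : List String) (j : Nat) (hj : j < L.length) :
    ((pvCovLine L).getD j false = true) ↔
      ((∃ k, k < j ∧ L.getD k "" = "T" ∧ ∀ m, k < m → m < j → L.getD m "" ≠ "O")
       ∨ (∃ k, j < k ∧ k < L.length ∧ L.getD k "" = "T" ∧
            ∀ m, j < m → m < k → L.getD m "" ≠ "O")) := by
  have h1 : (pvSweep L).length = L.length := by rw [pvSweep_eq, sweepFrom_length]
  have h2 : ((pvSweep L.reverse).reverse).length = L.length := by
    simp [pvSweep_eq, sweepFrom_length]
  have hz : (pvCovLine L).getD j false =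
      ((pvSweep L).getD j false || ((pvSweep L.reverse).reverse).getD j false) := by
    unfold pvCovLine
    rw [List.getD_eq_getElem _ _ (by rw [List.length_zipWith, h1, h2]; omega),
        List.getElem_zipWith,
        List.getD_eq_getElem _ _ (by rw [h1]; exact hj), List.getD_eq_getElem _ _ (by rw [h2]; exact hj)]
  rw [hz]
  have hf : (pvSweep L).getD j false = (L.take j).foldl stStep false := by
    rw [pvSweep_eq, sweepFrom_getD _ _ _ hj]
  have hlr : (pvSweep L.reverse).length = L.length := by
    rw [pvSweep_eq, sweepFrom_length, List.length_reverse]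
  have hb : ((pvSweep L.reverse).reverse).getD j false =
      (L.reverse.take (L.length - 1 - j)).foldl stStep false := by
    rw [getD_reverse _ _ _ (by rw [hlr]; exact hj), hlr, pvSweep_eq,
        sweepFrom_getD _ _ _ (by simp; omega)]
  rw [hf, hb, Bool.or_eq_true, forward_iff _ _ (le_of_lt hj), backward_iff _ _ hj]
theorem getD_map {α β} (f : α → β) (l : List α) (i : Nat) (d1 : α) (d2 : β)
    (hf : f d1 = d2) : (l.map f).getD i d2 = f (l.getD i d1) := by
  cases h : l[i]? with
  | none =>
    simp [List.getD, List.getElem?_map, h, hf]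
  | some a => simp [List.getD, List.getElem?_map, h]

theorem getD_map_range {β} (f : Nat → β) (n i : Nat) (d : β) (hi : i < n) :
    ((List.range n).map f).getD i d = f i := by
  rw [List.getD_eq_getElem _ _ (by simpa using hi)]
  simp

theorem rows_getD (arr : List (List String)) (i : Nat) :
    (arr.map (fun row => row.take arr.length)).getD i [] = (arr.getD i []).take arr.length :=
  getD_map _ _ _ _ _ (by simp)

theorem row_length (arr : List (List String)) (hpre : Pre_bfs arr) (i : Nat)
    (hi : i < arr.length) : ((arr.getD i []).take arr.length).length = arr.length := by
  have hmem : arr.getD i [] ∈ arr := by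
    rw [List.getD_eq_getElem _ _ hi]; exact List.getElem_mem _
  have := hpre _ hmem
  rw [List.length_take]
  omega
-- ===== A-side: ray-walk characterization =====
def WHit (g : List (List String)) (n : Nat) (dx dy x y : Int) (f : Nat) (i j : Nat) : Prop :=
  ∃ t : Nat, t < f ∧ (i : Int) = x + t * dx ∧ (j : Int) = y + t * dy ∧
    ∀ s : Nat, s ≤ t →
      0 ≤ x + s * dx ∧ 0 ≤ y + s * dy ∧ x + s * dx < (n : Int) ∧ y + s * dy < (n : Int) ∧
      pvCell g (x + s * dx).toNat (y + s * dy).toNat ≠ "O"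

theorem WHit_zero (g : List (List String)) (n : Nat) (dx dy x y : Int) (i j : Nat) :
    ¬ WHit g n dx dy x y 0 i j := by
  rintro ⟨t, ht, _⟩; omega

theorem WHit_shift (g : List (List String)) (n : Nat) (dx dy x y : Int) (f : Nat) (i j : Nat)
    (hx : 0 ≤ x) (hy : 0 ≤ y) (hxn : x < (n : Int)) (hyn : y < (n : Int))
    (hO : pvCell g x.toNat y.toNat ≠ "O") :
    WHit g n dx dy x y (f + 1) i j ↔
      ((i : Int) = x ∧ (j : Int) = y) ∨ WHit g n dx dy (x + dx) (y + dy) f i j := by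
  constructor
  · rintro ⟨t, ht, hi, hj, hch⟩
    cases t with
    | zero => left; constructor <;> [simpa using hi; simpa using hj]
    | succ t =>
      right
      refine ⟨t, by omega, by rw [hi]; push_cast; ring, by rw [hj]; push_cast; ring, ?_⟩
      intro s hs
      have := hch (s + 1) (by omega)
      have e1 : x + dx + (s : Int) * dx = x + (s + 1 : Nat) * dx := by push_cast; ring
      have e2 : y + dy + (s : Int) * dy = y + (s + 1 : Nat) * dy := by push_cast; ring
      rw [e1, e2]
      exact this
  · rintro (⟨hi, hj⟩ | ⟨t, ht, hi, hj, hch⟩)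
    · refine ⟨0, by omega, by simpa using hi, by simpa using hj, ?_⟩
      intro s hs
      have hs0 : s = 0 := by omega
      subst hs0
      simpa using ⟨hx, hy, hxn, hyn, hO⟩
    · refine ⟨t + 1, by omega, by rw [hi]; push_cast; ring, by rw [hj]; push_cast; ring, ?_⟩
      intro s hs
      cases s with
      | zero => simpa using ⟨hx, hy, hxn, hyn, hO⟩
      | succ s =>
        have := hch s (by omega)
        have e1 : x + (s + 1 : Nat) * dx = x + dx + (s : Int) * dx := by push_cast; ring
        have e2 : y + (s + 1 : Nat) * dy = y + dy + (s : Int) * dy := by push_cast; ring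
        rw [e1, e2]
        exact this
theorem walk_char (g : List (List String)) (n : Nat) (dx dy : Int) (f : Nat)
    (hrow : ∀ i, i < n → n ≤ (g.getD i []).length) (hng : n ≤ g.length) :
    ∀ (H : List (List String)) (x y : Int),
      H.length = g.length →
      (∀ i, (H.getD i []).length = (g.getD i []).length) →
      (∀ i j : Nat, i < n → j < n → (pvCell H i j = "O" ↔ pvCell g i j = "O")) →
      (pvWalk n dx dy f H x y).length = g.length ∧
      (∀ i, ((pvWalk n dx dy f H x y).getD i []).length = (g.getD i []).length) ∧
      (∀ i j : Nat, WHit g n dx dy x y f i j → pvCell (pvWalk n dx dy f H x y) i j = "T") ∧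
      (∀ i j : Nat, ¬ WHit g n dx dy x y f i j →
        pvCell (pvWalk n dx dy f H x y) i j = pvCell H i j) := by
  induction f with
  | zero =>
    intro H x y h1 h2 h3
    refine ⟨h1, h2, ?_, ?_⟩
    · intro i j hw; exact absurd hw (WHit_zero _ _ _ _ _ _ _ _)
    · intro i j _; rfl
  | succ f ih =>
    intro H x y h1 h2 h3
    by_cases hin : 0 ≤ x ∧ 0 ≤ y ∧ x < (n : Int) ∧ y < (n : Int)
    · obtain ⟨hx, hy, hxn, hyn⟩ := hin
      have hxlt : x.toNat < n := by omega
      have hylt : y.toNat < n := by omega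
      by_cases hO : pvCell H x.toNat y.toNat = "O"
      · -- hits an obstacle: no marking, loop breaks
        have hres : pvWalk n dx dy (f + 1) H x y = H := by
          rw [pvWalk]
          rw [if_pos ⟨hx, hy, hxn, hyn⟩]
          simp [hO]
        have hgO : pvCell g x.toNat y.toNat = "O" := (h3 _ _ hxlt hylt).mp hO
        have hnw : ∀ i j : Nat, ¬ WHit g n dx dy x y (f + 1) i j := by
          rintro i j ⟨t, ht, hi, hj, hch⟩
          have h0 := hch 0 (by omega)
          simp only [Nat.cast_zero, zero_mul, add_zero] at h0
          exact h0.2.2.2.2 hgO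
        rw [hres]
        exact ⟨h1, h2, fun i j hw => absurd hw (hnw i j), fun i j _ => rfl⟩
      · -- free cell: mark it and continue
        have hres : pvWalk n dx dy (f + 1) H x y =
            pvWalk n dx dy f (pvSet H x.toNat y.toNat "T") (x + dx) (y + dy) := by
          rw [pvWalk]
          rw [if_pos ⟨hx, hy, hxn, hyn⟩]
          simp only [ne_eq, hO, not_false_eq_true, if_pos]
          have hcy : pvCell (pvSet H x.toNat y.toNat "T") x.toNat y.toNat = "T" := by
            rw [pvCell_set]
            rw [if_pos ⟨rfl, rfl, by omega, by rw [h2]; exact lt_of_lt_of_le hylt (hrow _ hxlt)⟩]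
          rw [if_neg (by rw [hcy]; decide)]
        set H1 := pvSet H x.toNat y.toNat "T" with hH1
        have h1' : H1.length = g.length := by rw [hH1, pvSet_length, h1]
        have h2' : ∀ i, (H1.getD i []).length = (g.getD i []).length := by
          intro i; rw [hH1, pvSet_row_length, h2]
        have hgO : pvCell g x.toNat y.toNat ≠ "O" := fun hc => hO ((h3 _ _ hxlt hylt).mpr hc)
        have h3' : ∀ i j : Nat, i < n → j < n → (pvCell H1 i j = "O" ↔ pvCell g i j = "O") := by
          intro i j hi hj
          rw [hH1, pvCell_set]
          split_ifs with hc
          · obtain ⟨rfl, rfl, _⟩ := hc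
            constructor
            · intro h; exact absurd h (by decide)
            · intro h; exact absurd h hgO
          · exact h3 i j hi hj
        obtain ⟨c1, c2, c3, c4⟩ := ih H1 (x + dx) (y + dy) h1' h2' h3'
        rw [hres]
        refine ⟨c1, c2, ?_, ?_⟩
        · intro i j hw
          rw [WHit_shift _ _ _ _ _ _ _ _ _ hx hy hxn hyn hgO] at hw
          rcases hw with ⟨hi, hj⟩ | hw
          · have hieq : i = x.toNat := by omega
            have hjeq : j = y.toNat := by omega
            subst hieq; subst hjeq
            by_cases hw2 : WHit g n dx dy (x + dx) (y + dy) f x.toNat y.toNat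
            · exact c3 _ _ hw2
            · rw [c4 _ _ hw2, hH1, pvCell_set]
              rw [if_pos ⟨rfl, rfl, by omega, by rw [h2]; exact lt_of_lt_of_le hylt (hrow _ hxlt)⟩]
          · exact c3 _ _ hw
        · intro i j hw
          rw [WHit_shift _ _ _ _ _ _ _ _ _ hx hy hxn hyn hgO] at hw
          have hne : ¬((i : Int) = x ∧ (j : Int) = y) := fun h => hw (Or.inl h)
          have hw2 : ¬ WHit g n dx dy (x + dx) (y + dy) f i j := fun h => hw (Or.inr h)
          rw [c4 _ _ hw2, hH1, pvCell_set]
          rw [if_neg]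
          rintro ⟨rfl, rfl, _⟩
          exact hne ⟨by omega, by omega⟩
    · have hres : pvWalk n dx dy (f + 1) H x y = H := by
        rw [pvWalk, if_neg hin]
      have hnw : ∀ i j : Nat, ¬ WHit g n dx dy x y (f + 1) i j := by
        rintro i j ⟨t, ht, hi, hj, hch⟩
        have h0 := hch 0 (by omega)
        simp only [Nat.cast_zero, zero_mul, add_zero] at h0
        exact hin ⟨h0.1, h0.2.1, h0.2.2.1, h0.2.2.2.1⟩
      rw [hres]
      exact ⟨h1, h2, fun i j hw => absurd hw (hnw i j), fun i j _ => rfl⟩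
theorem WHit_right (g : List (List String)) (n : Nat) (a b : Nat) (ha : a < n) (hb : b < n)
    (i j : Nat) :
    WHit g n 0 1 (a : Int) ((b : Int) + 1) (n + 1) i j ↔
      (i = a ∧ b < j ∧ j < n ∧ ∀ m, b < m → m ≤ j → pvCell g i m ≠ "O") := by
  constructor
  · rintro ⟨t, ht, hi, hj, hch⟩
    have hia : i = a := by omega
    have hjt : j = b + 1 + t := by omega
    have hjn : j < n := by
      have := hch t le_rfl
      omega
    refine ⟨hia, by omega, hjn, ?_⟩
    intro m h1 h2
    have hs := hch (m - b - 1) (by omega)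
    have e1 : ((a : Int) + ((m - b - 1 : Nat) : Int) * 0).toNat = a := by omega
    have e2 : ((b : Int) + 1 + ((m - b - 1 : Nat) : Int) * 1).toNat = m := by omega
    rw [e1, e2] at hs
    rw [hia]
    exact hs.2.2.2.2
  · rintro ⟨hia, hbj, hjn, hch⟩
    subst hia
    refine ⟨j - b - 1, by omega, by omega, by omega, ?_⟩
    intro s hs
    have e1 : ((i : Int) + (s : Int) * 0).toNat = i := by omega
    have e2 : ((b : Int) + 1 + (s : Int) * 1).toNat = b + 1 + s := by omega
    rw [e1, e2]
    exact ⟨by omega, by omega, by omega, by omega, hch (b + 1 + s) (by omega) (by omega)⟩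

theorem WHit_left (g : List (List String)) (n : Nat) (a b : Nat) (ha : a < n) (hb : b < n)
    (i j : Nat) :
    WHit g n 0 (-1) (a : Int) ((b : Int) - 1) (n + 1) i j ↔
      (i = a ∧ j < b ∧ ∀ m, j ≤ m → m < b → pvCell g i m ≠ "O") := by
  constructor
  · rintro ⟨t, ht, hi, hj, hch⟩
    have hia : i = a := by omega
    have hjt : (j : Int) = (b : Int) - 1 - t := by omega
    refine ⟨hia, by omega, ?_⟩
    intro m h1 h2
    have hs := hch (b - 1 - m) (by omega)
    have e1 : ((a : Int) + ((b - 1 - m : Nat) : Int) * 0).toNat = a := by omega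
    have e2 : ((b : Int) - 1 + ((b - 1 - m : Nat) : Int) * (-1)).toNat = m := by omega
    rw [e1, e2] at hs
    rw [hia]
    exact hs.2.2.2.2
  · rintro ⟨hia, hjb, hch⟩
    subst hia
    refine ⟨b - 1 - j, by omega, by omega, by omega, ?_⟩
    intro s hs
    have e1 : ((i : Int) + (s : Int) * 0).toNat = i := by omega
    have e2 : ((b : Int) - 1 + (s : Int) * (-1)).toNat = b - 1 - s := by omega
    rw [e1, e2]
    exact ⟨by omega, by omega, by omega, by omega, hch (b - 1 - s) (by omega) (by omega)⟩

theorem WHit_down (g : List (List String)) (n : Nat) (a b : Nat) (ha : a < n) (hb : b < n)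
    (i j : Nat) :
    WHit g n 1 0 ((a : Int) + 1) (b : Int) (n + 1) i j ↔
      (j = b ∧ a < i ∧ i < n ∧ ∀ m, a < m → m ≤ i → pvCell g m j ≠ "O") := by
  constructor
  · rintro ⟨t, ht, hi, hj, hch⟩
    have hjb : j = b := by omega
    have hit : i = a + 1 + t := by omega
    have hin : i < n := by
      have := hch t le_rfl
      omega
    refine ⟨hjb, by omega, hin, ?_⟩
    intro m h1 h2
    have hs := hch (m - a - 1) (by omega)
    have e1 : ((a : Int) + 1 + ((m - a - 1 : Nat) : Int) * 1).toNat = m := by omega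
    have e2 : ((b : Int) + ((m - a - 1 : Nat) : Int) * 0).toNat = b := by omega
    rw [e1, e2] at hs
    rw [hjb]
    exact hs.2.2.2.2
  · rintro ⟨hjb, hai, hin, hch⟩
    subst hjb
    refine ⟨i - a - 1, by omega, by omega, by omega, ?_⟩
    intro s hs
    have e1 : ((a : Int) + 1 + (s : Int) * 1).toNat = a + 1 + s := by omega
    have e2 : ((j : Int) + (s : Int) * 0).toNat = j := by omega
    rw [e1, e2]
    exact ⟨by omega, by omega, by omega, by omega, hch (a + 1 + s) (by omega) (by omega)⟩

theorem WHit_up (g : List (List String)) (n : Nat) (a b : Nat) (ha : a < n) (hb : b < n)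
    (i j : Nat) :
    WHit g n (-1) 0 ((a : Int) - 1) (b : Int) (n + 1) i j ↔
      (j = b ∧ i < a ∧ ∀ m, i ≤ m → m < a → pvCell g m j ≠ "O") := by
  constructor
  · rintro ⟨t, ht, hi, hj, hch⟩
    have hjb : j = b := by omega
    refine ⟨hjb, by omega, ?_⟩
    intro m h1 h2
    have hs := hch (a - 1 - m) (by omega)
    have e1 : ((a : Int) - 1 + ((a - 1 - m : Nat) : Int) * (-1)).toNat = m := by omega
    have e2 : ((b : Int) + ((a - 1 - m : Nat) : Int) * 0).toNat = b := by omega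
    rw [e1, e2] at hs
    rw [hjb]
    exact hs.2.2.2.2
  · rintro ⟨hjb, hia, hch⟩
    subst hjb
    refine ⟨a - 1 - i, by omega, by omega, by omega, ?_⟩
    intro s hs
    have e1 : ((a : Int) - 1 + (s : Int) * (-1)).toNat = a - 1 - s := by omega
    have e2 : ((j : Int) + (s : Int) * 0).toNat = j := by omega
    rw [e1, e2]
    exact ⟨by omega, by omega, by omega, by omega, hch (a - 1 - s) (by omega) (by omega)⟩
def Hit (g : List (List String)) (n : Nat) (t : Nat × Nat) (i j : Nat) : Prop :=
  (i = t.1 ∧ t.2 < j ∧ j < n ∧ ∀ m, t.2 < m → m ≤ j → pvCell g i m ≠ "O") ∨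
  (i = t.1 ∧ j < t.2 ∧ ∀ m, j ≤ m → m < t.2 → pvCell g i m ≠ "O") ∨
  (j = t.2 ∧ t.1 < i ∧ i < n ∧ ∀ m, t.1 < m → m ≤ i → pvCell g m j ≠ "O") ∨
  (j = t.2 ∧ i < t.1 ∧ ∀ m, i ≤ m → m < t.1 → pvCell g m j ≠ "O")

def Marked (g : List (List String)) (n : Nat) (ts : List (Nat × Nat)) (i j : Nat) : Prop :=
  ∃ t ∈ ts, Hit g n t i j

theorem Hit_nonO (g : List (List String)) (n : Nat) (t : Nat × Nat) (i j : Nat)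
    (h1 : t.1 < n) (h2 : t.2 < n) (h : Hit g n t i j) :
    pvCell g i j ≠ "O" ∧ i < n ∧ j < n := by
  rcases h with ⟨hi, hb, hjn, hch⟩ | ⟨hi, hb, hch⟩ | ⟨hj, hb, hin, hch⟩ | ⟨hj, hb, hch⟩
  · exact ⟨hch j hb le_rfl, by omega, hjn⟩
  · exact ⟨hch j le_rfl hb, by omega, by omega⟩
  · exact ⟨hch i hb le_rfl, hin, by omega⟩
  · exact ⟨hch i le_rfl hb, by omega, by omega⟩

theorem mem_pvTeachers (g : List (List String)) (n : Nat) (x : Nat × Nat) :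
    x ∈ pvTeachers g n ↔ x.1 < n ∧ x.2 < n ∧ pvCell g x.1 x.2 = "T" := by
  unfold pvTeachers
  have hinner : ∀ (i : Nat) (acc : List (Nat × Nat)),
      (List.range n).foldl (fun acc e => if pvCell g i e = "T" then acc ++ [(i, e)] else acc) acc
        = acc ++ ((List.range n).filter (fun e => decide (pvCell g i e = "T"))).map
            (fun e => (i, e)) := by
    intro i acc
    exact PySem.List.foldl_append_ite _ _ _ _
  have houter : (List.range n).foldl (fun acc i =>
      (List.range n).foldl (fun acc e => if pvCell g i e = "T" then acc ++ [(i, e)] else acc) acc)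
        ([] : List (Nat × Nat))
      = [] ++ (List.range n).flatMap (fun i =>
          ((List.range n).filter (fun e => decide (pvCell g i e = "T"))).map (fun e => (i, e))) := by
    rw [← PySem.List.foldl_append_eq_flatMap]
    exact PySem.List.foldl_congr_mem _ _ _ _ (fun acc i _ => hinner i acc)
  rw [houter]
  simp only [List.nil_append, List.mem_flatMap, List.mem_map, List.mem_filter, List.mem_range]
  constructor
  · rintro ⟨i, hi, e, ⟨he, hT⟩, rfl⟩
    exact ⟨hi, he, by simpa using hT⟩
  · rintro ⟨h1, h2, hT⟩
    exact ⟨x.1, h1, x.2, ⟨h2, by simpa using hT⟩, rfl⟩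
theorem WHit_nonO (g : List (List String)) (n : Nat) (dx dy x y : Int) (f : Nat) (i j : Nat)
    (h : WHit g n dx dy x y f i j) : pvCell g i j ≠ "O" ∧ i < n ∧ j < n := by
  obtain ⟨t, ht, hi, hj, hch⟩ := h
  have hc := hch t le_rfl
  have e1 : (x + (t : Int) * dx).toNat = i := by omega
  have e2 : (y + (t : Int) * dy).toNat = j := by omega
  rw [e1, e2] at hc
  exact ⟨hc.2.2.2.2, by omega, by omega⟩

theorem walk_T_preserve (g : List (List String)) (n : Nat) (dx dy : Int) (f : Nat)
    (hrow : ∀ i, i < n → n ≤ (g.getD i []).length) (hng : n ≤ g.length)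
    (H : List (List String)) (x y : Int)
    (h1 : H.length = g.length) (h2 : ∀ i, (H.getD i []).length = (g.getD i []).length)
    (h3 : ∀ i j : Nat, i < n → j < n → (pvCell H i j = "O" ↔ pvCell g i j = "O"))
    (i j : Nat) (hT : pvCell H i j = "T") :
    pvCell (pvWalk n dx dy f H x y) i j = "T" := by
  obtain ⟨_, _, c3, c4⟩ := walk_char g n dx dy f hrow hng H x y h1 h2 h3
  by_cases hw : WHit g n dx dy x y f i j
  · exact c3 i j hw
  · rw [c4 i j hw]; exact hT

theorem walk_O_agree (g : List (List String)) (n : Nat) (dx dy : Int) (f : Nat)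
    (hrow : ∀ i, i < n → n ≤ (g.getD i []).length) (hng : n ≤ g.length)
    (H : List (List String)) (x y : Int)
    (h1 : H.length = g.length) (h2 : ∀ i, (H.getD i []).length = (g.getD i []).length)
    (h3 : ∀ i j : Nat, i < n → j < n → (pvCell H i j = "O" ↔ pvCell g i j = "O")) :
    ∀ i j : Nat, i < n → j < n →
      (pvCell (pvWalk n dx dy f H x y) i j = "O" ↔ pvCell g i j = "O") := by
  obtain ⟨_, _, c3, c4⟩ := walk_char g n dx dy f hrow hng H x y h1 h2 h3
  intro i j hi hj
  by_cases hw : WHit g n dx dy x y f i j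
  · rw [c3 i j hw]
    have := (WHit_nonO g n dx dy x y f i j hw).1
    constructor
    · intro h; exact absurd h (by decide)
    · intro h; exact absurd h this
  · rw [c4 i j hw]; exact h3 i j hi hj
theorem step_char (g : List (List String)) (n : Nat)
    (hrow : ∀ i, i < n → n ≤ (g.getD i []).length) (hng : n ≤ g.length)
    (a b : Nat) (ha : a < n) (hb : b < n)
    (H : List (List String))
    (h1 : H.length = g.length) (h2 : ∀ i, (H.getD i []).length = (g.getD i []).length)
    (h3 : ∀ i j : Nat, i < n → j < n → (pvCell H i j = "O" ↔ pvCell g i j = "O")) :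
    let H' := [((0 : Int), (1 : Int)), (0, -1), (1, 0), (-1, 0)].foldl
      (fun g' d => pvWalk n d.1 d.2 (n + 1) g' ((a : Int) + d.1) ((b : Int) + d.2)) H
    H'.length = g.length ∧
    (∀ i, (H'.getD i []).length = (g.getD i []).length) ∧
    (∀ i j : Nat, Hit g n (a, b) i j → pvCell H' i j = "T") ∧
    (∀ i j : Nat, ¬ Hit g n (a, b) i j → pvCell H' i j = pvCell H i j) := by
  intro H'
  have hH' : H' = pvWalk n (-1) 0 (n + 1)
      (pvWalk n 1 0 (n + 1)
        (pvWalk n 0 (-1) (n + 1)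
          (pvWalk n 0 1 (n + 1) H ((a : Int)) ((b : Int) + 1))
          ((a : Int)) ((b : Int) - 1))
        ((a : Int) + 1) ((b : Int)))
      ((a : Int) - 1) ((b : Int)) := by
    show [((0 : Int), (1 : Int)), (0, -1), (1, 0), (-1, 0)].foldl _ H = _
    simp only [List.foldl_cons, List.foldl_nil]
    norm_num
    rw [show ((b : Int) + -1) = (b : Int) - 1 from by ring,
        show ((a : Int) + -1) = (a : Int) - 1 from by ring]
  obtain ⟨l1, r1, m1, u1⟩ := walk_char g n 0 1 (n + 1) hrow hng H (a : Int) ((b : Int) + 1) h1 h2 h3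
  have ag1 := walk_O_agree g n 0 1 (n + 1) hrow hng H (a : Int) ((b : Int) + 1) h1 h2 h3
  set W1 := pvWalk n 0 1 (n + 1) H (a : Int) ((b : Int) + 1) with hW1
  obtain ⟨l2, r2, m2, u2⟩ := walk_char g n 0 (-1) (n + 1) hrow hng W1 (a : Int) ((b : Int) - 1) l1 r1 ag1
  have ag2 := walk_O_agree g n 0 (-1) (n + 1) hrow hng W1 (a : Int) ((b : Int) - 1) l1 r1 ag1
  set W2 := pvWalk n 0 (-1) (n + 1) W1 (a : Int) ((b : Int) - 1) with hW2
  obtain ⟨l3, r3, m3, u3⟩ := walk_char g n 1 0 (n + 1) hrow hng W2 ((a : Int) + 1) (b : Int) l2 r2 ag2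
  have ag3 := walk_O_agree g n 1 0 (n + 1) hrow hng W2 ((a : Int) + 1) (b : Int) l2 r2 ag2
  set W3 := pvWalk n 1 0 (n + 1) W2 ((a : Int) + 1) (b : Int) with hW3
  obtain ⟨l4, r4, m4, u4⟩ := walk_char g n (-1) 0 (n + 1) hrow hng W3 ((a : Int) - 1) (b : Int) l3 r3 ag3
  have hH'W : H' = pvWalk n (-1) 0 (n + 1) W3 ((a : Int) - 1) (b : Int) := hH'
  refine ⟨by rw [hH'W]; exact l4, by rw [hH'W]; exact r4, ?_, ?_⟩
  · intro i j hhit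
    rw [hH'W]
    rcases hhit with hc | hc | hc | hc
    · -- teacher's right ray
      have hw : WHit g n 0 1 (a : Int) ((b : Int) + 1) (n + 1) i j :=
        (WHit_right g n a b ha hb i j).mpr hc
      have t1 : pvCell W1 i j = "T" := m1 i j hw
      have t2 : pvCell W2 i j = "T" :=
        walk_T_preserve g n 0 (-1) (n + 1) hrow hng W1 _ _ l1 r1 ag1 i j t1
      have t3 : pvCell W3 i j = "T" :=
        walk_T_preserve g n 1 0 (n + 1) hrow hng W2 _ _ l2 r2 ag2 i j t2
      exact walk_T_preserve g n (-1) 0 (n + 1) hrow hng W3 _ _ l3 r3 ag3 i j t3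
    · have hw : WHit g n 0 (-1) (a : Int) ((b : Int) - 1) (n + 1) i j :=
        (WHit_left g n a b ha hb i j).mpr hc
      have t2 : pvCell W2 i j = "T" := m2 i j hw
      have t3 : pvCell W3 i j = "T" :=
        walk_T_preserve g n 1 0 (n + 1) hrow hng W2 _ _ l2 r2 ag2 i j t2
      exact walk_T_preserve g n (-1) 0 (n + 1) hrow hng W3 _ _ l3 r3 ag3 i j t3
    · have hw : WHit g n 1 0 ((a : Int) + 1) (b : Int) (n + 1) i j :=
        (WHit_down g n a b ha hb i j).mpr hc
      have t3 : pvCell W3 i j = "T" := m3 i j hw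
      exact walk_T_preserve g n (-1) 0 (n + 1) hrow hng W3 _ _ l3 r3 ag3 i j t3
    · have hw : WHit g n (-1) 0 ((a : Int) - 1) (b : Int) (n + 1) i j :=
        (WHit_up g n a b ha hb i j).mpr hc
      exact m4 i j hw
  · intro i j hhit
    rw [hH'W]
    have n1 : ¬ WHit g n 0 1 (a : Int) ((b : Int) + 1) (n + 1) i j := fun hw =>
      hhit (Or.inl ((WHit_right g n a b ha hb i j).mp hw))
    have n2 : ¬ WHit g n 0 (-1) (a : Int) ((b : Int) - 1) (n + 1) i j := fun hw =>
      hhit (Or.inr (Or.inl ((WHit_left g n a b ha hb i j).mp hw)))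
    have n3 : ¬ WHit g n 1 0 ((a : Int) + 1) (b : Int) (n + 1) i j := fun hw =>
      hhit (Or.inr (Or.inr (Or.inl ((WHit_down g n a b ha hb i j).mp hw))))
    have n4 : ¬ WHit g n (-1) 0 ((a : Int) - 1) (b : Int) (n + 1) i j := fun hw =>
      hhit (Or.inr (Or.inr (Or.inr ((WHit_up g n a b ha hb i j).mp hw))))
    rw [u4 i j n4, u3 i j n3, u2 i j n2, u1 i j n1]
theorem fold_teachers (g : List (List String)) (n : Nat)
    (hrow : ∀ i, i < n → n ≤ (g.getD i []).length) (hng : n ≤ g.length) :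
    ∀ (ts S : List (Nat × Nat)) (H : List (List String)),
      (∀ t ∈ S, t.1 < n ∧ t.2 < n) → (∀ t ∈ ts, t.1 < n ∧ t.2 < n) →
      H.length = g.length →
      (∀ i, (H.getD i []).length = (g.getD i []).length) →
      (∀ i j : Nat, Marked g n S i j → pvCell H i j = "T") →
      (∀ i j : Nat, ¬ Marked g n S i j → pvCell H i j = pvCell g i j) →
      (ts.foldl (fun g' rc => [((0 : Int), (1 : Int)), (0, -1), (1, 0), (-1, 0)].foldl
          (fun g'' d => pvWalk n d.1 d.2 (n + 1) g'' ((rc.1 : Int) + d.1) ((rc.2 : Int) + d.2)) g') H).length = g.length ∧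
      (∀ i, ((ts.foldl (fun g' rc => [((0 : Int), (1 : Int)), (0, -1), (1, 0), (-1, 0)].foldl
          (fun g'' d => pvWalk n d.1 d.2 (n + 1) g'' ((rc.1 : Int) + d.1) ((rc.2 : Int) + d.2)) g') H).getD i []).length = (g.getD i []).length) ∧
      (∀ i j : Nat, Marked g n (S ++ ts) i j →
        pvCell (ts.foldl (fun g' rc => [((0 : Int), (1 : Int)), (0, -1), (1, 0), (-1, 0)].foldl
          (fun g'' d => pvWalk n d.1 d.2 (n + 1) g'' ((rc.1 : Int) + d.1) ((rc.2 : Int) + d.2)) g') H) i j = "T") ∧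
      (∀ i j : Nat, ¬ Marked g n (S ++ ts) i j →
        pvCell (ts.foldl (fun g' rc => [((0 : Int), (1 : Int)), (0, -1), (1, 0), (-1, 0)].foldl
          (fun g'' d => pvWalk n d.1 d.2 (n + 1) g'' ((rc.1 : Int) + d.1) ((rc.2 : Int) + d.2)) g') H) i j = pvCell g i j) := by
  intro ts
  induction ts with
  | nil =>
    intro S H hS _ h1 h2 hm hu
    simp only [List.foldl_nil, List.append_nil]
    exact ⟨h1, h2, hm, hu⟩
  | cons t ts ih =>
    intro S H hS hts h1 h2 hm hu
    have ht : t.1 < n ∧ t.2 < n := hts t List.mem_cons_self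
    have h3 : ∀ i j : Nat, i < n → j < n → (pvCell H i j = "O" ↔ pvCell g i j = "O") := by
      intro i j hi hj
      by_cases hmk : Marked g n S i j
      · rw [hm i j hmk]
        obtain ⟨t', ht', hhit⟩ := hmk
        have := Hit_nonO g n t' i j (hS t' ht').1 (hS t' ht').2 hhit
        constructor
        · intro h; exact absurd h (by decide)
        · intro h; exact absurd h this.1
      · rw [hu i j hmk]
    obtain ⟨s1, s2, s3, s4⟩ := step_char g n hrow hng t.1 t.2 ht.1 ht.2 H h1 h2 h3
    rw [List.foldl_cons]
    have hres := ih (S ++ [t])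
      ([((0 : Int), (1 : Int)), (0, -1), (1, 0), (-1, 0)].foldl
        (fun g'' d => pvWalk n d.1 d.2 (n + 1) g'' ((t.1 : Int) + d.1) ((t.2 : Int) + d.2)) H)
      (by intro t' ht'; rcases List.mem_append.mp ht' with h | h
          · exact hS t' h
          · rw [List.mem_singleton.mp h]; exact ht)
      (fun t' ht' => hts t' (List.mem_cons_of_mem _ ht'))
      s1 s2
      (by intro i j hmk
          obtain ⟨t', ht', hhit⟩ := hmk
          rcases List.mem_append.mp ht' with h | h
          · by_cases hh : Hit g n (t.1, t.2) i j
            · exact s3 i j hh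
            · rw [s4 i j hh]; exact hm i j ⟨t', h, hhit⟩
          · rw [List.mem_singleton.mp h] at hhit
            exact s3 i j hhit)
      (by intro i j hmk
          have hnt : ¬ Hit g n (t.1, t.2) i j := by
            intro hh
            exact hmk ⟨t, List.mem_append.mpr (Or.inr (List.mem_singleton_self t)), by simpa using hh⟩
          rw [s4 i j hnt]
          exact hu i j (by
            rintro ⟨t', ht', hhit⟩
            exact hmk ⟨t', List.mem_append.mpr (Or.inl ht'), hhit⟩))
    have heq : S ++ t :: ts = (S ++ [t]) ++ ts := by simp
    rw [heq]
    exact hres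
theorem marked_iff_sees (g : List (List String)) (n : Nat) (i j : Nat)
    (hi : i < n) (hj : j < n) (hS : pvCell g i j ≠ "O") :
    Marked g n (pvTeachers g n) i j ↔
      ((SeesL g i j ∨ SeesR g n i j) ∨ (SeesU g i j ∨ SeesD g n i j)) := by
  constructor
  · rintro ⟨t, htm, hhit⟩
    obtain ⟨ht1, ht2, htT⟩ := (mem_pvTeachers g n t).mp htm
    rcases hhit with ⟨hie, hbj, hjn, hch⟩ | ⟨hie, hjb, hch⟩ | ⟨hje, hai, hin, hch⟩ | ⟨hje, hia, hch⟩
    · exact Or.inl (Or.inl ⟨t.2, hbj, by rw [hie]; exact htT, fun m hm1 hm2 => hch m hm1 (by omega)⟩)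
    · exact Or.inl (Or.inr ⟨t.2, hjb, ht2, by rw [hie]; exact htT, fun m hm1 hm2 => hch m (by omega) hm2⟩)
    · exact Or.inr (Or.inl ⟨t.1, hai, by rw [hje]; exact htT, fun m hm1 hm2 => hch m hm1 (by omega)⟩)
    · exact Or.inr (Or.inr ⟨t.1, hia, ht1, by rw [hje]; exact htT, fun m hm1 hm2 => hch m (by omega) hm2⟩)
  · rintro ((⟨k, hk, hT, hch⟩ | ⟨k, hk1, hk2, hT, hch⟩) | (⟨k, hk, hT, hch⟩ | ⟨k, hk1, hk2, hT, hch⟩))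
    · refine ⟨(i, k), (mem_pvTeachers g n (i, k)).mpr ⟨hi, by omega, hT⟩, Or.inl ⟨rfl, hk, hj, ?_⟩⟩
      intro m hm1 hm2
      rcases Nat.lt_or_ge m j with h | h
      · exact hch m hm1 h
      · have : m = j := by omega
        rw [this]; exact hS
    · refine ⟨(i, k), (mem_pvTeachers g n (i, k)).mpr ⟨hi, hk2, hT⟩,
        Or.inr (Or.inl ⟨rfl, hk1, ?_⟩)⟩
      intro m hm1 hm2
      rcases Nat.lt_or_ge j m with h | h
      · exact hch m h hm2
      · have : m = j := by omega
        rw [this]; exact hS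
    · refine ⟨(k, j), (mem_pvTeachers g n (k, j)).mpr ⟨by omega, hj, hT⟩,
        Or.inr (Or.inr (Or.inl ⟨rfl, hk, hi, ?_⟩))⟩
      intro m hm1 hm2
      rcases Nat.lt_or_ge m i with h | h
      · exact hch m hm1 h
      · have : m = i := by omega
        rw [this]; exact hS
    · refine ⟨(k, j), (mem_pvTeachers g n (k, j)).mpr ⟨hk2, hj, hT⟩,
        Or.inr (Or.inr (Or.inr ⟨rfl, hk1, ?_⟩))⟩
      intro m hm1 hm2
      rcases Nat.lt_or_ge i m with h | h
      · exact hch m h hm2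
      · have : m = i := by omega
        rw [this]; exact hS
theorem foldl_count_congr (n : Nat) (P Q : Nat → Nat → Prop)
    [dp : ∀ i j, Decidable (P i j)] [dq : ∀ i j, Decidable (Q i j)]
    (h : ∀ i j, i < n → j < n → (P i j ↔ Q i j)) :
    (List.range n).foldl (fun a i => (List.range n).foldl
       (fun a j => if P i j then a + 1 else a) a) (0 : Int)
      = (List.range n).foldl (fun a i => (List.range n).foldl
       (fun a j => if Q i j then a + 1 else a) a) (0 : Int) := by
  apply PySem.List.foldl_congr_mem
  intro acc i hi
  apply PySem.List.foldl_congr_mem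
  intro acc2 j hj
  exact if_congr (h i j (List.mem_range.mp hi) (List.mem_range.mp hj)) rfl rfl

theorem bcond_iff (arr : List (List String)) (hpre : Pre_bfs arr) (i j : Nat)
    (hi : i < arr.length) (hj : j < arr.length) :
    (((arr.map (fun row => row.take arr.length)).getD i []).getD j "" = "S" ∧
      ¬((((arr.map (fun row => row.take arr.length)).map pvCovLine).getD i []).getD j false ∨
        ((((List.range arr.length).map (fun j' => (List.range arr.length).map
            (fun i' => ((arr.map (fun row => row.take arr.length)).getD i' []).getD j' ""))).map
              pvCovLine).getD j []).getD i false)) ↔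
    (pvCell arr i j = "S" ∧
      ¬((SeesL arr i j ∨ SeesR arr arr.length i j) ∨ (SeesU arr i j ∨ SeesD arr arr.length i j))) := by
  set n := arr.length with hn
  have hcell : ∀ i' j' : Nat, j' < n →
      ((arr.map (fun row => row.take n)).getD i' []).getD j' "" = pvCell arr i' j' := by
    intro i' j' hj'
    rw [rows_getD, getD_take _ _ _ _ hj']
    rfl
  have hrowlen : ∀ i' : Nat, i' < n → ((arr.getD i' []).take n).length = n :=
    fun i' hi' => row_length arr hpre i' hi'
  -- row coverage booleans ↔ SeesL/SeesR
  have hb1 : ((((arr.map (fun row => row.take n)).map pvCovLine).getD i []).getD j false = true) ↔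
      (SeesL arr i j ∨ SeesR arr n i j) := by
    rw [getD_map pvCovLine _ _ [] [] rfl, rows_getD]
    rw [covLine_getD _ _ (by rw [hrowlen i hi]; exact hj)]
    constructor
    · rintro (⟨k, hk, hT, hch⟩ | ⟨k, hk1, hk2, hT, hch⟩)
      · refine Or.inl ⟨k, hk, ?_, ?_⟩
        · rw [getD_take _ _ _ _ (by omega)] at hT; exact hT
        · intro m h1 h2
          have := hch m h1 h2
          rwa [getD_take _ _ _ _ (by omega)] at this
      · rw [hrowlen i hi] at hk2
        refine Or.inr ⟨k, hk1, hk2, ?_, ?_⟩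
        · rw [getD_take _ _ _ _ (by omega)] at hT; exact hT
        · intro m h1 h2
          have := hch m h1 h2
          rwa [getD_take _ _ _ _ (by omega)] at this
    · rintro (⟨k, hk, hT, hch⟩ | ⟨k, hk1, hk2, hT, hch⟩)
      · refine Or.inl ⟨k, hk, ?_, ?_⟩
        · rw [getD_take _ _ _ _ (by omega)]; exact hT
        · intro m h1 h2
          rw [getD_take _ _ _ _ (by omega)]
          exact hch m h1 h2
      · refine Or.inr ⟨k, hk1, by rw [hrowlen i hi]; exact hk2, ?_, ?_⟩
        · rw [getD_take _ _ _ _ (by omega)]; exact hT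
        · intro m h1 h2
          rw [getD_take _ _ _ _ (by omega)]
          exact hch m h1 h2
  -- column coverage booleans ↔ SeesU/SeesD
  have hcol : ((List.range n).map (fun j' => (List.range n).map
      (fun i' => ((arr.map (fun row => row.take n)).getD i' []).getD j' ""))).getD j [] =
      (List.range n).map (fun i' => ((arr.map (fun row => row.take n)).getD i' []).getD j "") :=
    getD_map_range _ _ _ _ hj
  have hcolget : ∀ k : Nat, k < n →
      ((List.range n).map (fun i' => ((arr.map (fun row => row.take n)).getD i' []).getD j "")).getD k ""
        = pvCell arr k j := by
    intro k hk
    rw [getD_map_range _ _ _ _ hk, hcell k j hj]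
  have hcollen : ((List.range n).map (fun i' =>
      ((arr.map (fun row => row.take n)).getD i' []).getD j "")).length = n := by
    simp
  have hb2 : (((((List.range n).map (fun j' => (List.range n).map
      (fun i' => ((arr.map (fun row => row.take n)).getD i' []).getD j' ""))).map
        pvCovLine).getD j []).getD i false = true) ↔
      (SeesU arr i j ∨ SeesD arr n i j) := by
    rw [getD_map pvCovLine _ _ [] [] rfl, hcol]
    rw [covLine_getD _ _ (by rw [hcollen]; exact hi)]
    rw [hcollen]
    constructor
    · rintro (⟨k, hk, hT, hch⟩ | ⟨k, hk1, hk2, hT, hch⟩)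
      · refine Or.inl ⟨k, hk, ?_, ?_⟩
        · rwa [hcolget k (by omega)] at hT
        · intro m h1 h2
          have := hch m h1 h2
          rwa [hcolget m (by omega)] at this
      · refine Or.inr ⟨k, hk1, hk2, ?_, ?_⟩
        · rwa [hcolget k hk2] at hT
        · intro m h1 h2
          have := hch m h1 h2
          rwa [hcolget m (by omega)] at this
    · rintro (⟨k, hk, hT, hch⟩ | ⟨k, hk1, hk2, hT, hch⟩)
      · refine Or.inl ⟨k, hk, ?_, ?_⟩
        · rw [hcolget k (by omega)]; exact hT
        · intro m h1 h2
          rw [hcolget m (by omega)]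
          exact hch m h1 h2
      · refine Or.inr ⟨k, hk1, hk2, ?_, ?_⟩
        · rw [hcolget k hk2]; exact hT
        · intro m h1 h2
          rw [hcolget m (by omega)]
          exact hch m h1 h2
  rw [hcell i j hj]
  constructor
  · rintro ⟨hS, hncov⟩
    refine ⟨hS, ?_⟩
    rintro (h | h)
    · exact hncov (Or.inl (hb1.mpr h))
    · exact hncov (Or.inr (hb2.mpr h))
  · rintro ⟨hS, hnsee⟩
    refine ⟨hS, ?_⟩
    rintro (h | h)
    · exact hnsee (Or.inl (hb1.mp h))
    · exact hnsee (Or.inr (hb2.mp h))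
theorem bfs_eq_alt (arr : List (List String)) (hpre : Pre_bfs arr) : bfs arr = bfs_alt arr := by
  have hrow : ∀ i', i' < arr.length → arr.length ≤ (arr.getD i' []).length := by
    intro i' hi'
    have hmem : arr.getD i' [] ∈ arr := by
      rw [List.getD_eq_getElem _ _ hi']; exact List.getElem_mem _
    exact hpre _ hmem
  have hts : ∀ t ∈ pvTeachers arr arr.length, t.1 < arr.length ∧ t.2 < arr.length := by
    intro t ht
    have := (mem_pvTeachers _ _ t).mp ht
    exact ⟨this.1, this.2.1⟩
  obtain ⟨G1, G2, Gm, Gu⟩ := fold_teachers arr arr.length hrow le_rfl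
    (pvTeachers arr arr.length) [] arr
    (by intro t ht; cases ht) hts rfl (fun i => rfl)
    (by rintro i j ⟨t, ht, _⟩; cases ht) (fun i j _ => rfl)
  simp only [bfs, bfs_alt]
  refine foldl_count_congr arr.length _ _ ?_
  intro i j hi hj
  have hPa : pvCell ((pvTeachers arr arr.length).foldl
      (fun g' rc => [((0 : Int), (1 : Int)), (0, -1), (1, 0), (-1, 0)].foldl
        (fun g'' d => pvWalk arr.length d.1 d.2 (arr.length + 1) g''
          ((rc.1 : Int) + d.1) ((rc.2 : Int) + d.2)) g') arr) i j = "S" ↔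
      (pvCell arr i j = "S" ∧ ¬ Marked arr arr.length (pvTeachers arr arr.length) i j) := by
    constructor
    · intro h
      by_cases hmk : Marked arr arr.length (pvTeachers arr arr.length) i j
      · rw [Gm i j hmk] at h
        exact absurd h (by decide)
      · rw [Gu i j hmk] at h
        exact ⟨h, hmk⟩
    · rintro ⟨hS, hmk⟩
      rw [Gu i j hmk]
      exact hS
  have hMS : (pvCell arr i j = "S" ∧ ¬ Marked arr arr.length (pvTeachers arr arr.length) i j) ↔
      (pvCell arr i j = "S" ∧
        ¬((SeesL arr i j ∨ SeesR arr arr.length i j) ∨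
          (SeesU arr i j ∨ SeesD arr arr.length i j))) := by
    constructor
    · rintro ⟨hS, h⟩
      exact ⟨hS, fun hs => h ((marked_iff_sees arr arr.length i j hi hj
        (by rw [hS]; decide)).mpr hs)⟩
    · rintro ⟨hS, h⟩
      exact ⟨hS, fun hm => h ((marked_iff_sees arr arr.length i j hi hj
        (by rw [hS]; decide)).mp hm)⟩
  exact hPa.trans (hMS.trans (bcond_iff arr hpre i j hi hj).symm)

-- ===== VERDICT (by name: the statement is the Claim_ definition above) =====
theorem bfs_spec : Claim_equal_bfs := by
  intro arr _ hpre
  exact bfs_eq_alt arr hpre
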